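-- pv_equiv track=rewrite | github.com/linnil1/KIR_graph | case_repeat.py | selectUniqueName
-- ===== SOURCE A (Python) =====
-- def selectUniqueName(names, sep="*"):
--     s = set()
--     for i in sorted(names):
--         if sep == "*":
--             key = i.split("*")[0]
--         elif type(sep) is int:
--             key = i.split("*")[0] + "*" + i.split("*")[1][:sep]
--         else:
--             key = i
--         if key not in s:
--             s.add(key)
--             yield i
-- ===== SOURCE B (Python) =====
-- def selectUniqueName(names, sep="*"):
--     def keyfunc(i):
--         if sep == "*":
--             return i.split("*")[0]
--         if type(sep) is int:
--             return i.split("*")[0] + "*" + i.split("*")[1][:sep]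
--         return i
--
--     best = {}
--     for i in names:
--         k = keyfunc(i)
--         b = best.get(k)
--         if b is None or i < b:
--             best[k] = i
--     yield from sorted(best.values())
-- ===== Notes on version B (the rewrite author's own statement) =====
-- stated objective: alternative
-- what changed: A sorts the whole list and scans it with a seen-key set, yielding the first name per key; B makes one pass over the unsorted names keeping the lexicographically smallest name per key in a dict, then sorts only those representatives.
import Mathlib
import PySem

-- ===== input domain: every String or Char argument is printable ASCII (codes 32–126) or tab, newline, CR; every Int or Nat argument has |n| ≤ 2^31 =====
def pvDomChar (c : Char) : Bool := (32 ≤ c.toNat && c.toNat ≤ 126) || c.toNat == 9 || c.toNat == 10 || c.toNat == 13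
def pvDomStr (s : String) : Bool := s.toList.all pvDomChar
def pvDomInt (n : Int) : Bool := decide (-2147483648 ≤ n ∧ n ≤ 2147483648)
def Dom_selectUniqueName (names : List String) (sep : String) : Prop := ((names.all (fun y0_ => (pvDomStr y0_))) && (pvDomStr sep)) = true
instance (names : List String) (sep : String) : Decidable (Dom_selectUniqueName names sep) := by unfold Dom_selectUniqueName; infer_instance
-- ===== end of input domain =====

-- B replaces A's sort-then-dedup-by-key scan with a single unsorted pass keeping the
-- minimal name per key in a dict, then sorts only the representatives (objective: alternative).


-- ===== PORT A =====
-- A's key expression: i.split("*")[0].  split with a nonempty separator always returns a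
-- nonempty list, so the [0] indexing is its head (exact).  A's `type(sep) is int` branch is
-- unreachable for a str sep (sep : String here) and therefore has no Lean counterpart.
def pvKeyA (sep i : String) : String :=
  if sep == "*" then ((PySem.Str.split? i "*").getD []).headD "" else i

-- the loop `for i in sorted(names): …` with the accumulated set s and the yielded list
def selectUniqueNameGo (sep : String) (s : PySem.Set String) : List String → List String
  | [] => []
  | i :: rest =>
    let key := pvKeyA sep i
    if !(PySem.Set.contains s key) then i :: selectUniqueNameGo sep (PySem.Set.add s key) rest
    else selectUniqueNameGo sep s rest

def selectUniqueName (names : List String) (sep : String) : List String :=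
  selectUniqueNameGo sep PySem.Set.empty (PySem.List.sorted names (fun i => i))

-- ===== PORT B =====
-- Source B's keyfunc (same remark as for pvKeyA: the int branch is unreachable for a str sep)
def pvKeyB (sep i : String) : String :=
  if sep == "*" then ((PySem.Str.split? i "*").getD []).headD "" else i

-- one step of B's loop: keep the lexicographically smallest name seen for each key
def pvBestStep (sep : String) (d : PySem.Dict String String) (i : String) : PySem.Dict String String :=
  let k := pvKeyB sep i
  match PySem.Dict.get? d k with
  | none => PySem.Dict.insert d k i
  | some b => if i < b then PySem.Dict.insert d k i else d

def selectUniqueName_alt (names : List String) (sep : String) : List String :=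
  let best := names.foldl (pvBestStep sep) PySem.Dict.empty
  PySem.List.sorted (PySem.Dict.values best) (fun x => x)

-- ===== PRECONDITION & SPEC =====
def Spec_selectUniqueName (names : List String) (sep : String) (out : List String) : Prop := out = selectUniqueName_alt names sep
instance (names : List String) (sep : String) (out : List String) : Decidable (Spec_selectUniqueName names sep out) := by unfold Spec_selectUniqueName; infer_instance

-- ===== CLAIM (what is proved, stated in full; the proofs are below) =====
def Claim_equal_selectUniqueName : Prop := ∀ (names : List String) (sep : String), Dom_selectUniqueName names sep → Spec_selectUniqueName names sep (selectUniqueName names sep)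

-- ===== LEMMAS AND PROOFS =====

theorem pvKeyB_eq_pvKeyA : pvKeyB = pvKeyA := rfl

-- A's loop emits a sublist of the traversed list
theorem go_sublist (sep : String) (s : PySem.Set String) (l : List String) :
    (selectUniqueNameGo sep s l).Sublist l := by
  induction l generalizing s with
  | nil => simp [selectUniqueNameGo]
  | cons a t ih =>
    simp only [selectUniqueNameGo]
    split
    · exact (ih _).cons₂ a
    · exact (ih s).cons a

-- every emitted element has a key outside the starting set
theorem go_key_not_mem (sep : String) (s : PySem.Set String) (l : List String) (x : String)
    (hx : x ∈ selectUniqueNameGo sep s l) : pvKeyA sep x ∉ s := by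
  induction l generalizing s with
  | nil => simp [selectUniqueNameGo] at hx
  | cons a t ih =>
    simp only [selectUniqueNameGo] at hx
    split at hx
    · rename_i hc
      rcases List.mem_cons.1 hx with rfl | hx'
      · intro hmem
        simp at hc
        exact hc hmem
      · intro hmem
        exact ih _ hx' ((PySem.Set.mem_add _ _ _).2 (Or.inl hmem))
    · exact ih s hx

-- membership characterisation of A's loop on a ≤-sorted list:
-- x is emitted iff its key is fresh and x is ≤-minimal among elements sharing its key
theorem go_mem (sep : String) (l : List String) (s : PySem.Set String)
    (h : l.Pairwise (· ≤ ·)) (x : String) :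
    x ∈ selectUniqueNameGo sep s l ↔
      x ∈ l ∧ pvKeyA sep x ∉ s ∧ ∀ y ∈ l, pvKeyA sep y = pvKeyA sep x → x ≤ y := by
  induction l generalizing s with
  | nil => simp [selectUniqueNameGo]
  | cons a t ih =>
    rcases List.pairwise_cons.1 h with ⟨ha, ht⟩
    simp only [selectUniqueNameGo]
    by_cases hc : PySem.Set.contains s (pvKeyA sep a)
    · have hamem : pvKeyA sep a ∈ s := (PySem.Set.contains_iff _ _).1 hc
      rw [if_neg (by simpa using hamem), ih s ht]
      constructor
      · rintro ⟨hxt, hxs, hmin⟩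
        refine ⟨List.mem_cons_of_mem _ hxt, hxs, ?_⟩
        intro y hy hk
        rcases List.mem_cons.1 hy with rfl | hy'
        · exact absurd (hk ▸ hamem) hxs
        · exact hmin y hy' hk
      · rintro ⟨hxl, hxs, hmin⟩
        rcases List.mem_cons.1 hxl with rfl | hxt
        · exact absurd hamem hxs
        · exact ⟨hxt, hxs, fun y hy hk => hmin y (List.mem_cons_of_mem _ hy) hk⟩
    · have hanot : pvKeyA sep a ∉ s := fun hm => hc ((PySem.Set.contains_iff _ _).2 hm)
      rw [if_pos (by simpa using hanot)]
      constructor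
      · intro hx
        rcases List.mem_cons.1 hx with rfl | hx'
        · refine ⟨List.mem_cons_self, hanot, ?_⟩
          intro y hy hk
          rcases List.mem_cons.1 hy with rfl | hy'
          · exact le_refl _
          · exact ha y hy'
        · rcases (ih _ ht).1 hx' with ⟨hxt, hxs, hmin⟩
          have hxs' : pvKeyA sep x ∉ s := fun hm => hxs ((PySem.Set.mem_add _ _ _).2 (Or.inl hm))
          have hxa : pvKeyA sep x ≠ pvKeyA sep a :=
            fun he => hxs ((PySem.Set.mem_add _ _ _).2 (Or.inr he))
          refine ⟨List.mem_cons_of_mem _ hxt, hxs', ?_⟩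
          intro y hy hk
          rcases List.mem_cons.1 hy with rfl | hy'
          · exact absurd hk hxa.symm
          · exact hmin y hy' hk
      · rintro ⟨hxl, hxs, hmin⟩
        rcases List.mem_cons.1 hxl with rfl | hxt
        · exact List.mem_cons_self
        · by_cases hk : pvKeyA sep x = pvKeyA sep a
          · have hxa : x ≤ a := hmin a List.mem_cons_self hk.symm
            have hax : a ≤ x := ha x hxt
            have : x = a := le_antisymm hxa hax
            exact this ▸ List.mem_cons_self
          · refine List.mem_cons_of_mem _ ((ih _ ht).2 ⟨hxt, ?_, ?_⟩)
            · intro hm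
              rcases (PySem.Set.mem_add _ _ _).1 hm with hm' | hm'
              · exact hxs hm'
              · exact hk hm'
            · exact fun y hy hk' => hmin y (List.mem_cons_of_mem _ hy) hk'

-- emitted elements have pairwise distinct keys
theorem go_pairwise_ne (sep : String) (l : List String) (s : PySem.Set String) :
    (selectUniqueNameGo sep s l).Pairwise (fun a b => pvKeyA sep a ≠ pvKeyA sep b) := by
  induction l generalizing s with
  | nil => simp [selectUniqueNameGo]
  | cons a t ih =>
    simp only [selectUniqueNameGo]
    split
    · refine List.pairwise_cons.2 ⟨?_, ih _⟩
      intro b hb he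
      exact go_key_not_mem sep _ t b hb ((PySem.Set.mem_add _ _ _).2 (Or.inr he.symm))
    · exact ih s

-- B's inner "minimum so far per key K" fold, read off a single dict slot
def pvMinStep (sep K : String) : Option String → String → Option String
  | none, i => if pvKeyA sep i = K then some i else none
  | some b, i => if pvKeyA sep i = K then (if i < b then some i else some b) else some b

def pvMin (sep K : String) (o : Option String) (l : List String) : Option String :=
  l.foldl (pvMinStep sep K) o

theorem pvMinStep_of_ne {sep K i : String} (hk : pvKeyA sep i ≠ K) (o : Option String) :
    pvMinStep sep K o i = o := by
  cases o <;> simp [pvMinStep, hk]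

-- the K-slot of B's dict fold is exactly pvMin
theorem get_fold (sep : String) (l : List String) (d : PySem.Dict String String) (K : String) :
    PySem.Dict.get? (l.foldl (pvBestStep sep) d) K = pvMin sep K (PySem.Dict.get? d K) l := by
  induction l generalizing d with
  | nil => rfl
  | cons i t ih =>
    rw [List.foldl_cons, ih]
    have hstep : PySem.Dict.get? (pvBestStep sep d i) K =
        pvMinStep sep K (PySem.Dict.get? d K) i := by
      simp only [pvBestStep, pvKeyB_eq_pvKeyA]
      by_cases hk : pvKeyA sep i = K
      · subst hk
        cases h : PySem.Dict.get? d (pvKeyA sep i) with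
        | none => simp [pvMinStep, PySem.Dict.get?_insert_self]
        | some b =>
          by_cases hib : i < b
          · simp [hib, pvMinStep, PySem.Dict.get?_insert_self]
          · simp [h, hib, pvMinStep]
      · rw [pvMinStep_of_ne hk]
        cases h : PySem.Dict.get? d (pvKeyA sep i) with
        | none =>
          exact PySem.Dict.get?_insert_of_ne d i (fun he => hk he.symm)
        | some b =>
          show (if i < b then PySem.Dict.insert d (pvKeyA sep i) i else d).get? K = PySem.Dict.get? d K
          by_cases hib : i < b
          · rw [if_pos hib]
            exact PySem.Dict.get?_insert_of_ne d i (fun he => hk he.symm)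
          · rw [if_neg hib]
    rw [hstep]
    rfl

theorem pvMin_spec (sep K : String) (l : List String) :
    ∀ (o : Option String) (v : String), pvMin sep K o l = some v →
      (o = some v ∨ (v ∈ l ∧ pvKeyA sep v = K)) ∧
      (∀ b, o = some b → v ≤ b) ∧
      (∀ y ∈ l, pvKeyA sep y = K → v ≤ y) := by
  induction l with
  | nil =>
    intro o v hv
    simp only [pvMin, List.foldl_nil] at hv
    refine ⟨Or.inl hv, ?_, by simp⟩
    intro b hb
    rw [hv] at hb
    cases hb
    exact le_refl _
  | cons i t ih =>
    intro o v hv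
    simp only [pvMin, List.foldl_cons] at hv
    by_cases hk : pvKeyA sep i = K
    · cases o with
      | none =>
        rw [show pvMinStep sep K none i = some i from by simp [pvMinStep, hk]] at hv
        obtain ⟨h1, h2, h3⟩ := ih (some i) v hv
        refine ⟨?_, ?_, ?_⟩
        · right
          rcases h1 with he | ⟨hm, hkk⟩
          · cases he
            exact ⟨List.mem_cons_self, hk⟩
          · exact ⟨List.mem_cons_of_mem _ hm, hkk⟩
        · intro b hb
          cases hb
        · intro y hy hky
          rcases List.mem_cons.1 hy with rfl | hy'
          · exact h2 y rfl
          · exact h3 y hy' hky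
      | some b =>
        by_cases hib : i < b
        · rw [show pvMinStep sep K (some b) i = some i from by simp [pvMinStep, hk, hib]] at hv
          obtain ⟨h1, h2, h3⟩ := ih (some i) v hv
          have hvi : v ≤ i := h2 i rfl
          refine ⟨?_, ?_, ?_⟩
          · right
            rcases h1 with he | ⟨hm, hkk⟩
            · cases he
              exact ⟨List.mem_cons_self, hk⟩
            · exact ⟨List.mem_cons_of_mem _ hm, hkk⟩
          · intro b' hb'
            cases hb'
            exact le_of_lt (lt_of_le_of_lt hvi hib)
          · intro y hy hky
            rcases List.mem_cons.1 hy with rfl | hy'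
            · exact hvi
            · exact h3 y hy' hky
        · rw [show pvMinStep sep K (some b) i = some b from by simp [pvMinStep, hk, hib]] at hv
          obtain ⟨h1, h2, h3⟩ := ih (some b) v hv
          have hvb : v ≤ b := h2 b rfl
          refine ⟨?_, ?_, ?_⟩
          · rcases h1 with he | ⟨hm, hkk⟩
            · exact Or.inl he
            · exact Or.inr ⟨List.mem_cons_of_mem _ hm, hkk⟩
          · intro b' hb'
            cases hb'
            exact hvb
          · intro y hy hky
            rcases List.mem_cons.1 hy with rfl | hy'
            · exact le_trans hvb (le_of_not_gt hib)
            · exact h3 y hy' hky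
    · rw [pvMinStep_of_ne hk] at hv
      obtain ⟨h1, h2, h3⟩ := ih o v hv
      refine ⟨?_, h2, ?_⟩
      · rcases h1 with he | ⟨hm, hkk⟩
        · exact Or.inl he
        · exact Or.inr ⟨List.mem_cons_of_mem _ hm, hkk⟩
      · intro y hy hky
        rcases List.mem_cons.1 hy with rfl | hy'
        · exact absurd hky hk
        · exact h3 y hy' hky

theorem pvMinStep_isSome_of_isSome (sep K i : String) (o : Option String) (ho : o.isSome) :
    (pvMinStep sep K o i).isSome := by
  cases o with
  | none => cases ho
  | some b =>
    by_cases hk : pvKeyA sep i = K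
    · by_cases hib : i < b <;> simp [pvMinStep, hk, hib]
    · simp [pvMinStep, hk]

theorem pvMin_isSome (sep K : String) (l : List String) :
    ∀ (o : Option String), ((∃ y ∈ l, pvKeyA sep y = K) ∨ o.isSome) →
      (pvMin sep K o l).isSome := by
  induction l with
  | nil =>
    intro o h
    rcases h with ⟨y, hy, _⟩ | h
    · cases hy
    · exact h
  | cons i t ih =>
    intro o h
    simp only [pvMin, List.foldl_cons]
    by_cases hk : pvKeyA sep i = K
    · refine ih (pvMinStep sep K o i) (Or.inr ?_)
      cases o with
      | none => simp [pvMinStep, hk]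
      | some b => exact pvMinStep_isSome_of_isSome sep K i (some b) rfl
    · rw [pvMinStep_of_ne hk]
      rcases h with ⟨y, hy, hky⟩ | ho
      · rcases List.mem_cons.1 hy with rfl | hy'
        · exact absurd hky hk
        · exact ih o (Or.inl ⟨y, hy', hky⟩)
      · exact ih o (Or.inr ho)

theorem keys_fold (sep : String) (l : List String) (d : PySem.Dict String String) :
    (l.foldl (pvBestStep sep) d).keys = PySem.Set.update (PySem.Dict.keys d) (l.map (pvKeyA sep)) := by
  induction l generalizing d with
  | nil => simp [PySem.Set.update_nil]
  | cons i t ih =>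
    rw [List.foldl_cons, ih, List.map_cons, PySem.Set.update_cons]
    congr 1
    simp only [pvBestStep, pvKeyB_eq_pvKeyA]
    cases h : PySem.Dict.get? d (pvKeyA sep i) with
    | none =>
      have hnc : d.contains (pvKeyA sep i) = false := by
        rw [PySem.Dict.contains_eq_isSome_get?, h]
        rfl
      have hnm : pvKeyA sep i ∉ d.keys := (PySem.Dict.get?_eq_none_iff_not_mem_keys d _).1 h
      rw [PySem.Dict.keys_insert_of_not_contains d i hnc, PySem.Set.add_of_not_mem hnm]
    | some b =>
      have hc : d.contains (pvKeyA sep i) = true := by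
        rw [PySem.Dict.contains_eq_isSome_get?, h]
        rfl
      have hm : pvKeyA sep i ∈ d.keys := by
        by_contra h'
        rw [(PySem.Dict.get?_eq_none_iff_not_mem_keys d _).2 h'] at h
        cases h
      rw [PySem.Set.add_of_mem hm]
      show (if i < b then PySem.Dict.insert d (pvKeyA sep i) i else d).keys = PySem.Dict.keys d
      by_cases hib : i < b
      · rw [if_pos hib]
        exact PySem.Dict.keys_insert_of_contains d i hc
      · rw [if_neg hib]

-- A = B: A's emitted list is exactly the strictly-increasing enumeration of the
-- per-key minima, which is what B's dict pass followed by a sort produces.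
theorem selectUniqueName_eq (names : List String) (sep : String) :
    selectUniqueName names sep = selectUniqueName_alt names sep := by
  unfold selectUniqueName selectUniqueName_alt
  set k := pvKeyA sep with hk
  set L := PySem.List.sorted names (fun i => i) with hLdef
  set M := selectUniqueNameGo sep PySem.Set.empty L with hMdef
  set best := names.foldl (pvBestStep sep) PySem.Dict.empty with hbest
  show M = PySem.List.sorted best.values (fun x => x)
  have hLpw : L.Pairwise (fun a b => a ≤ b) := PySem.List.sorted_pairwise names (fun i => i)
  have hMle : M.Pairwise (fun a b => a ≤ b) :=
    List.Pairwise.sublist (go_sublist sep PySem.Set.empty L) hLpw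
  have hMne : M.Pairwise (fun a b => k a ≠ k b) := go_pairwise_ne sep L PySem.Set.empty
  have hMlt : M.Pairwise (fun a b => a < b) :=
    (hMle.and hMne).imp (fun h => lt_of_le_of_ne h.1 (fun he => h.2 (congrArg k he)))
  have hMnd : M.Nodup := hMlt.imp (fun h => ne_of_lt h)
  have hMmem : ∀ x, x ∈ M ↔ (x ∈ names ∧ ∀ y ∈ names, k y = k x → x ≤ y) := by
    intro x
    rw [hMdef, go_mem sep L PySem.Set.empty hLpw x]
    constructor
    · rintro ⟨hx, -, hmin⟩
      exact ⟨(PySem.List.mem_sorted names _ _ x).1 hx,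
        fun y hy hky => hmin y ((PySem.List.mem_sorted names _ _ y).2 hy) hky⟩
    · rintro ⟨hx, hmin⟩
      refine ⟨(PySem.List.mem_sorted names _ _ x).2 hx, ?_, ?_⟩
      · exact List.not_mem_nil
      · exact fun y hy hky => hmin y ((PySem.List.mem_sorted names _ _ y).1 hy) hky
  have hkeys : best.keys = PySem.Set.ofList (names.map k) := by
    rw [hbest, keys_fold, PySem.Dict.keys_empty, PySem.Set.update_nil_left]
  have hknd : best.keys.Nodup := by
    rw [hkeys]
    exact PySem.Set.nodup_ofList _
  have hget : ∀ K, best.get? K = pvMin sep K none names := by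
    intro K
    rw [hbest, get_fold, PySem.Dict.get?_empty]
  have hIsMin : ∀ K ∈ best.keys, (best.getD K "") ∈ names ∧ k (best.getD K "") = K ∧
      ∀ y ∈ names, k y = K → best.getD K "" ≤ y := by
    intro K hK
    have hex : ∃ y ∈ names, k y = K := by
      rw [hkeys, PySem.Set.mem_ofList] at hK
      rcases List.mem_map.1 hK with ⟨y, hy, he⟩
      exact ⟨y, hy, he⟩
    obtain ⟨v, hv⟩ := Option.isSome_iff_exists.1 (pvMin_isSome sep K names none (Or.inl hex))
    have hgd : best.getD K "" = v :=
      PySem.Dict.getD_of_get?_eq_some best "" (by rw [hget K, hv])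
    obtain ⟨h1, -, h3⟩ := pvMin_spec sep K names none v hv
    rcases h1 with he | ⟨hm, hkv⟩
    · cases he
    · rw [hgd]
      exact ⟨hm, hkv, fun y hy hky => h3 y hy hky⟩
  have hVal : best.values = best.keys.map (fun K => best.getD K "") :=
    PySem.Dict.values_eq_map_keys best hknd ""
  have hVmem : ∀ x, x ∈ best.values ↔ (x ∈ names ∧ ∀ y ∈ names, k y = k x → x ≤ y) := by
    intro x
    rw [hVal]
    constructor
    · intro hx
      rcases List.mem_map.1 hx with ⟨K, hK, he⟩
      obtain ⟨hm, hkv, hmin⟩ := hIsMin K hK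
      subst he
      exact ⟨hm, fun y hy hky => hmin y hy (by rw [hky, hkv])⟩
    · rintro ⟨hx, hmin⟩
      have hK : k x ∈ best.keys := by
        rw [hkeys, PySem.Set.mem_ofList]
        exact List.mem_map.2 ⟨x, hx, rfl⟩
      obtain ⟨hm, hkv, hminv⟩ := hIsMin (k x) hK
      have heq : best.getD (k x) "" = x := le_antisymm (hminv x hx rfl) (hmin _ hm hkv)
      exact List.mem_map.2 ⟨k x, hK, heq⟩
  have hVnd : best.values.Nodup := by
    rw [hVal]
    refine List.Nodup.map_on ?_ hknd
    intro K1 h1 K2 h2 he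
    have e1 := (hIsMin K1 h1).2.1
    have e2 := (hIsMin K2 h2).2.1
    rw [← e1, ← e2, he]
  have hperm : M.Perm best.values :=
    (List.perm_ext_iff_of_nodup hMnd hVnd).2 (fun a => (hMmem a).trans (hVmem a).symm)
  exact (PySem.List.sorted_eq_of_perm_of_pairwise_lt best.values M (fun x => x) hperm hMlt).symm

-- ===== VERDICT (by name: the statement is the Claim_ definition above) =====
theorem selectUniqueName_spec : Claim_equal_selectUniqueName := by
  intro names sep _
  exact selectUniqueName_eq names sep
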